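-- pv_equiv track=rewrite | github.com/textmate/swift.tmbundle | get_builtin_types.py | optimize_alternations
-- ===== SOURCE A (Python) =====
-- from collections import defaultdict
--
-- def optimize_alternations(strs):
--   buckets = defaultdict(list)
--   optional = False
--   for s in sorted(strs):
--     if not s:
--       optional = True
--     else:
--       buckets[s[0]].append(s[1:])
--
--   if buckets:
--     ptrns = [key + optimize_alternations(value) for key, value in buckets.items()]
--     if optional:
--       return "(?:" + "|".join(ptrns) + ")?"
--     elif len(ptrns) > 1:
--       return "(?:" + "|".join(ptrns) + ")"
--     else:
--       return ptrns[0]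
--
--   return ""
-- ===== SOURCE B (Python) =====
-- def _render(optional, ptrns):
--     if not ptrns:
--         return ""
--     body = "|".join(ptrns)
--     if optional:
--         return "(?:" + body + ")?"
--     if len(ptrns) > 1:
--         return "(?:" + body + ")"
--     return ptrns[0]
--
-- def optimize_alternations(strs):
--     # One sort, then a single left-to-right scan with an explicit stack of
--     # frames [word_ends_here, finished_child_patterns], one frame per depth
--     # of the current string's path.  When the next string diverges at depth k,
--     # the frames above k are popped and each popped frame is rendered and
--     # emitted into its parent's pattern list immediately.  No recursion, no
--     # sublists, no per-level regrouping or re-sorting.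
--     stack = [[False, []]]
--     prev = ""
--     for s in sorted(strs):
--         k = 0
--         while k < len(prev) and k < len(s) and prev[k] == s[k]:
--             k += 1
--         while len(stack) - 1 > k:
--             opt, ptrns = stack.pop()
--             stack[-1][1].append(prev[len(stack) - 1] + _render(opt, ptrns))
--         for _ in range(len(s) - k):
--             stack.append([False, []])
--         stack[-1][0] = True
--         prev = s
--     while len(stack) > 1:
--         opt, ptrns = stack.pop()
--         stack[-1][1].append(prev[len(stack) - 1] + _render(opt, ptrns))
--     return _render(stack[0][0], stack[0][1])
-- ===== Notes on version B (the rewrite author's own statement) =====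
-- stated objective: alternative
-- what changed: A is a recursive trie construction that re-sorts the strings and regroups them into first-character dict buckets at every level; B is non-recursive: it sorts once and makes a single left-to-right scan over the sorted strings with an explicit stack of depth frames, emitting each subpattern the moment the scan diverges from the current path, so there are no sublists, no regrouping and no per-level sorting.
import Mathlib
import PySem

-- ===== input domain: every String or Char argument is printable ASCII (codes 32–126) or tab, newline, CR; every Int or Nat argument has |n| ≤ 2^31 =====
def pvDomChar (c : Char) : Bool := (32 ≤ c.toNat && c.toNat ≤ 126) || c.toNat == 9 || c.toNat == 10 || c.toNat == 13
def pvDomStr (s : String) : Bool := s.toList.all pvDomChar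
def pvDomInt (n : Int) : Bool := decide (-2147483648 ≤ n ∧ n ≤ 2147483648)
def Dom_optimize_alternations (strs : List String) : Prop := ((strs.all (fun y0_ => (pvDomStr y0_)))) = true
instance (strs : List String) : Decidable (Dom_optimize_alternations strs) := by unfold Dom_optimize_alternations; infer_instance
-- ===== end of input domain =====

-- B replaces A's recursive per-level re-sort + dict bucketing by ONE sort followed by a
-- single non-recursive left-to-right scan with an explicit stack of depth frames.

-- ===== PORT A =====
-- shared helpers: s[0] and s[1:] (exact on nonempty s, the only place they are applied)
def pvHead (s : String) : Char := s.toList.headD ' '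
def pvTail (s : String) : String := String.ofList s.toList.tail
-- measure used only for termination of A's recursive port
def pvW (s : String) : Nat := s.toList.length + 1
def pvMu (l : List String) : Nat := (l.map pvW).sum

lemma pvMu_eq (l : List String) :
    pvMu l = (l.map (fun s => s.toList.length)).sum + l.length := by
  induction l with
  | nil => rfl
  | cons s t ih =>
    simp only [pvMu, pvW, List.map_cons, List.sum_cons, List.length_cons] at ih ⊢
    omega

-- buckets[s[0]].append(s[1:])  (defaultdict(list) → Dict.modify with default [])
def pvDStep (d : PySem.Dict Char (List String)) (s : String) : PySem.Dict Char (List String) :=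
  d.modify (pvHead s) [] (fun v => v ++ [pvTail s])
-- one iteration of A's loop over sorted(strs): state = (buckets, optional)
def pvAStep (st : PySem.Dict Char (List String) × Bool) (s : String) :
    PySem.Dict Char (List String) × Bool :=
  if s == "" then (st.1, true) else (pvDStep st.1 s, st.2)

def pvPairs (m : List String) : List (Char × String) := m.map (fun s => (pvHead s, pvTail s))

-- ---- lemmas cited by optimize_alternations' decreasing_by ----
lemma pvA_fst (m : List String) (d : PySem.Dict Char (List String)) (b : Bool) :
    (m.foldl pvAStep (d, b)).1 = (m.filter (fun s => !(s == ""))).foldl pvDStep d := by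
  induction m generalizing d b with
  | nil => rfl
  | cons s t ih =>
    by_cases h : s == "" <;> simp [pvAStep, h, List.filter_cons, ih]

lemma pvDict_keys (m : List String) :
    (m.foldl pvDStep PySem.Dict.empty).keys = PySem.Set.ofList (m.map pvHead) := by
  have h := PySem.Dict.keys_foldl_modify_key m pvHead ([] : List String)
    (fun _ s v => v ++ [pvTail s]) PySem.Dict.empty
  rw [show (List.foldl (fun d x => PySem.Dict.modify d (pvHead x) [] fun v => v ++ [pvTail x])
      PySem.Dict.empty m) = List.foldl pvDStep PySem.Dict.empty m from rfl] at h
  rw [h, PySem.Dict.keys_empty, PySem.Set.update_nil_left]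

lemma pvDict_nodup (m : List String) : (m.foldl pvDStep PySem.Dict.empty).keys.Nodup := by
  have h := PySem.Dict.nodup_keys_foldl_modify_key m pvHead ([] : List String)
    (fun _ s v => v ++ [pvTail s]) PySem.Dict.empty
    (by rw [PySem.Dict.keys_empty]; exact List.nodup_nil)
  rw [show (List.foldl (fun d x => PySem.Dict.modify d (pvHead x) [] fun v => v ++ [pvTail x])
      PySem.Dict.empty m) = List.foldl pvDStep PySem.Dict.empty m from rfl] at h
  exact h

lemma pvDict_getD (m : List String) (c : Char) :
    (m.foldl pvDStep PySem.Dict.empty).getD c [] =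
      ((pvPairs m).filter (fun p => p.1 == c)).map (fun p => p.2) := by
  have h1 : List.foldl pvDStep PySem.Dict.empty m =
      List.foldl (fun d p => PySem.Dict.modify d p.1 [] (fun v => v ++ [p.2]))
        PySem.Dict.empty (pvPairs m) := by
    rw [pvPairs, List.foldl_map]
    rfl
  rw [h1, PySem.Dict.getD_foldl_modify_append, PySem.Dict.getD_empty, List.nil_append]

lemma pvDict_items (m : List String) :
    (m.foldl pvDStep PySem.Dict.empty).items =
      (PySem.Set.ofList (m.map pvHead)).map
        (fun c => (c, ((pvPairs m).filter (fun p => p.1 == c)).map (fun p => p.2))) := by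
  rw [PySem.Dict.items_eq_map_keys _ (pvDict_nodup m) ([] : List String), pvDict_keys]
  exact List.map_congr_left (fun c _ => by rw [pvDict_getD])

lemma pv_toList_ne (s : String) (h : s ≠ "") : s.toList ≠ [] := by
  intro hn
  have := congrArg String.ofList hn
  rw [String.ofList_toList] at this
  exact h this

lemma pvW_tail (s : String) (h : s ≠ "") : pvW (pvTail s) = s.toList.length := by
  have h1 : s.toList ≠ [] := pv_toList_ne s h
  simp only [pvW, pvTail, String.toList_ofList, List.length_tail]
  have : 0 < s.toList.length := List.length_pos_iff.2 h1
  omega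

lemma pvA_mu_lt (strs : List String) (kv : Char × List String)
    (h : kv ∈ ((PySem.List.sorted strs (fun s => s) false).foldl pvAStep
        (PySem.Dict.empty, false)).1.items) :
    pvMu kv.2 < pvMu strs := by
  rw [pvA_fst, pvDict_items] at h
  set l := PySem.List.sorted strs (fun s => s) false with hl
  set fl := l.filter (fun s => !(s == "")) with hfl
  obtain ⟨c, hc, hkv⟩ := List.mem_map.1 h
  have hkv2 : kv.2 = ((pvPairs fl).filter (fun p => p.1 == c)).map (fun p => p.2) := by
    rw [← hkv]
  have hne : l ≠ [] := by
    intro h0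
    rw [hfl, h0] at hc
    simp [pvPairs] at hc
  have step1 : pvMu kv.2 ≤ ((pvPairs fl).map (fun p => pvW p.2)).sum := by
    rw [hkv2]
    unfold pvMu
    rw [List.map_map]
    exact List.Sublist.sum_le_sum (List.filter_sublist.map _) (fun x _ => Nat.zero_le x)
  have step2 : ((pvPairs fl).map (fun p => pvW p.2)).sum =
      (fl.map (fun s => s.toList.length)).sum := by
    rw [pvPairs, List.map_map]
    refine congrArg List.sum (List.map_congr_left ?_)
    intro s hs
    have hmem := List.of_mem_filter hs
    exact pvW_tail s (by simpa using hmem)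
  have step3 : (fl.map (fun s => s.toList.length)).sum ≤
      (l.map (fun s => s.toList.length)).sum := by
    rw [hfl]
    exact List.Sublist.sum_le_sum (List.filter_sublist.map _) (fun x _ => Nat.zero_le x)
  have step4 : (l.map (fun s => s.toList.length)).sum < pvMu l := by
    rw [pvMu_eq]
    have : 0 < l.length := List.length_pos_iff.2 hne
    omega
  have step5 : pvMu l = pvMu strs :=
    (List.Perm.map pvW (PySem.List.sorted_perm strs (fun s => s) false)).sum_eq
  omega

-- port of A: sort at EVERY level, bucket by first char into a dict, recurse on each bucket
def optimize_alternations (strs : List String) : String :=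
  let bo := (PySem.List.sorted strs (fun s => s) false).foldl pvAStep (PySem.Dict.empty, false)
  if bo.1.items.isEmpty then ""
  else
    let ptrns := bo.1.items.attach.map
      (fun kv => String.ofList [kv.1.1] ++ optimize_alternations kv.1.2)
    if bo.2 then "(?:" ++ PySem.Str.join "|" ptrns ++ ")?"
    else if 1 < ptrns.length then "(?:" ++ PySem.Str.join "|" ptrns ++ ")"
    else ptrns.headD ""
termination_by pvMu strs
decreasing_by exact pvA_mu_lt strs kv.1 kv.2

-- ===== PORT B =====
-- Source B is non-recursive: one sort, then a single scan with an explicit stack of frames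
-- (word_ends_here, finished_child_patterns).  Here the stack head is the DEEPEST frame
-- (Python's stack[-1]); prev is kept as a List Char.

-- _render of Source B
def pvRender (optional : Bool) (ptrns : List String) : String :=
  if ptrns.isEmpty then ""
  else if optional then "(?:" ++ PySem.Str.join "|" ptrns ++ ")?"
  else if 1 < ptrns.length then "(?:" ++ PySem.Str.join "|" ptrns ++ ")"
  else ptrns.headD ""

-- the `while k < len(prev) and k < len(s) and prev[k] == s[k]` loop
def pvLcp : List Char → List Char → Nat
  | a :: as, b :: bs => if a == b then pvLcp as bs + 1 else 0
  | _, _ => 0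

-- the `while len(stack) - 1 > k: …pop…` loop; frame depth of the head = length - 1,
-- and prev.getD is always in range here (the stack is never deeper than prev + 1)
def pvPopTo (k : Nat) : List (Bool × List String) → List Char → List (Bool × List String)
  | (opt, ptrns) :: f2 :: rest, prev =>
      if rest.length + 1 > k then
        pvPopTo k ((f2.1, f2.2 ++ [String.ofList [prev.getD rest.length ' '] ++ pvRender opt ptrns]) :: rest) prev
      else (opt, ptrns) :: f2 :: rest
  | st, _ => st
termination_by st _ => st.length
decreasing_by simp

-- the `for _ in range(len(s) - k): stack.append([False, []])` loop
def pvPushN : Nat → List (Bool × List String) → List (Bool × List String)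
  | 0, st => st
  | n + 1, st => pvPushN n ((false, []) :: st)

-- stack[-1][0] = True
def pvMarkTop : List (Bool × List String) → List (Bool × List String)
  | (_, p) :: rest => (true, p) :: rest
  | [] => []

-- one iteration of Source B's for-loop
def pvStep (st : List (Bool × List String) × List Char) (s : String) :
    List (Bool × List String) × List Char :=
  let k := pvLcp st.2 s.toList
  (pvMarkTop (pvPushN (s.toList.length - k) (pvPopTo k st.1 st.2)), s.toList)

-- the final `while len(stack) > 1: …pop…` loop plus the closing _render
def pvFlush : List (Bool × List String) → List Char → String
  | (opt, ptrns) :: f2 :: rest, prev =>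
      pvFlush ((f2.1, f2.2 ++ [String.ofList [prev.getD rest.length ' '] ++ pvRender opt ptrns]) :: rest) prev
  | [(opt, ptrns)], _ => pvRender opt ptrns
  | [], _ => ""
termination_by st _ => st.length
decreasing_by simp

-- port of B: sort ONCE, then one linear scan with the explicit stack, then flush
def optimize_alternations_alt (strs : List String) : String :=
  let r := (PySem.List.sorted strs (fun s => s) false).foldl pvStep ([(false, [])], [])
  pvFlush r.1 r.2

-- ===== PRECONDITION & SPEC =====
def Spec_optimize_alternations (strs : List String) (out : String) : Prop := out = optimize_alternations_alt strs
instance (strs : List String) (out : String) : Decidable (Spec_optimize_alternations strs out) := by unfold Spec_optimize_alternations; infer_instance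

-- ===== CLAIM (what is proved, stated in full; the proofs are below) =====
def Claim_equal_optimize_alternations : Prop := ∀ (strs : List String), Dom_optimize_alternations strs → Spec_optimize_alternations strs (optimize_alternations strs)

-- ===== LEMMAS AND PROOFS =====

-- proof-internal recursive characterisation: trie recursion on an ALREADY-SORTED list.
-- Both ports are proved equal to pvBuild ∘ sort (A by unwinding its per-level re-sorts,
-- B by a stack-machine ↔ recursion correspondence).

lemma pvW_tail_le (s : String) : pvW (pvTail s) ≤ pvW s := by
  simp only [pvW, pvTail, String.toList_ofList, List.length_tail]
  omega

def pvRun (c : Char) : List String → List String × List String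
  | [] => ([], [])
  | s :: rest =>
    if pvHead s == c then (pvTail s :: (pvRun c rest).1, (pvRun c rest).2)
    else ([], s :: rest)

lemma pvRun_eq (c : Char) (m : List String) :
    pvRun c m = ((m.takeWhile (fun t => pvHead t == c)).map pvTail,
                 m.dropWhile (fun t => pvHead t == c)) := by
  induction m with
  | nil => rfl
  | cons s rest ih =>
    by_cases h : pvHead s == c
    · simp [pvRun, h, List.takeWhile_cons, List.dropWhile_cons, ih]
    · simp [pvRun, h, List.takeWhile_cons, List.dropWhile_cons]

lemma pvRun_len (c : Char) (m : List String) : (pvRun c m).2.length ≤ m.length := by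
  rw [pvRun_eq]
  simpa using (List.dropWhile_sublist _).length_le

def pvGroups : List String → List (Char × List String)
  | [] => []
  | s :: rest =>
    (pvHead s, pvTail s :: (pvRun (pvHead s) rest).1) :: pvGroups (pvRun (pvHead s) rest).2
termination_by l => l.length
decreasing_by simpa using Nat.lt_succ_of_le (pvRun_len (pvHead s) rest)

lemma pvMu_sublist {a b : List String} (h : a.Sublist b) : pvMu a ≤ pvMu b := by
  exact List.Sublist.sum_le_sum (h.map pvW) (by intro x _; exact Nat.zero_le x)

lemma pvGroups_mu_le (n : Nat) : ∀ (m : List String), m.length ≤ n →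
    ∀ g ∈ pvGroups m, pvMu g.2 ≤ pvMu m := by
  induction n with
  | zero =>
    intro m hm
    have : m = [] := List.length_eq_zero_iff.1 (Nat.le_zero.1 hm)
    subst this
    simp [pvGroups]
  | succ n ih =>
    intro m hm g hg
    match m with
    | [] => simp [pvGroups] at hg
    | s :: rest =>
      rw [pvGroups] at hg
      rcases List.mem_cons.1 hg with hg | hg
      · subst hg
        have h1 : pvMu ((pvRun (pvHead s) rest).1) ≤ pvMu rest := by
          rw [pvRun_eq]
          calc pvMu ((rest.takeWhile (fun t => pvHead t == pvHead s)).map pvTail)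
              ≤ pvMu (rest.takeWhile (fun t => pvHead t == pvHead s)) := by
                unfold pvMu
                rw [List.map_map]
                exact List.sum_le_sum (fun x _ => pvW_tail_le x)
            _ ≤ pvMu rest := pvMu_sublist (List.takeWhile_sublist _)
        have h2 := pvW_tail_le s
        simp only [pvMu, List.map_cons, List.sum_cons] at h1 h2 ⊢
        omega
      · have hlen : (pvRun (pvHead s) rest).2.length ≤ n := by
          have := pvRun_len (pvHead s) rest
          simp at hm
          omega
        have h1 := ih _ hlen g hg
        have h2 : pvMu ((pvRun (pvHead s) rest).2) ≤ pvMu rest := by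
          rw [pvRun_eq]
          exact pvMu_sublist (List.dropWhile_sublist _)
        simp only [pvMu, List.map_cons, List.sum_cons] at h1 h2 ⊢
        omega

lemma pvGroups_mu_lt (s : String) (rest : List String) (hs : s ≠ "") :
    ∀ g ∈ pvGroups (s :: rest), pvMu g.2 < pvMu (s :: rest) := by
  intro g hg
  rw [pvGroups] at hg
  rcases List.mem_cons.1 hg with hg | hg
  · subst hg
    have h1 : pvMu ((pvRun (pvHead s) rest).1) ≤ pvMu rest := by
      rw [pvRun_eq]
      calc pvMu ((rest.takeWhile (fun t => pvHead t == pvHead s)).map pvTail)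
          ≤ pvMu (rest.takeWhile (fun t => pvHead t == pvHead s)) := by
            unfold pvMu
            rw [List.map_map]
            exact List.sum_le_sum (fun x _ => pvW_tail_le x)
        _ ≤ pvMu rest := pvMu_sublist (List.takeWhile_sublist _)
    have h2 := pvW_tail s hs
    have h3 : pvW s = s.toList.length + 1 := rfl
    simp only [pvMu, List.map_cons, List.sum_cons] at h1 ⊢
    omega
  · have h1 := pvGroups_mu_le ((pvRun (pvHead s) rest).2.length) _ le_rfl g hg
    have h2 : pvMu ((pvRun (pvHead s) rest).2) ≤ pvMu rest := by
      rw [pvRun_eq]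
      exact pvMu_sublist (List.dropWhile_sublist _)
    have h3 : 1 ≤ pvW s := by simp [pvW]
    simp only [pvMu, List.map_cons, List.sum_cons] at h1 h2 ⊢
    omega

lemma pv_dropWhile_head {α : Type} (p : α → Bool) :
    ∀ (l : List α) (t : α) (r : List α), l.dropWhile p = t :: r → p t = false := by
  intro l
  induction l with
  | nil => intro t r h; simp at h
  | cons x xs ih =>
    intro t r h
    rw [List.dropWhile_cons] at h
    by_cases hx : p x
    · rw [if_pos hx] at h; exact ih t r h
    · rw [if_neg hx] at h
      cases h
      simpa using hx

lemma pvB_mu_lt (xs : List String) (g : Char × List String)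
    (h : g ∈ pvGroups (xs.dropWhile (fun s => s == ""))) : pvMu g.2 < pvMu xs := by
  cases hys : xs.dropWhile (fun s => s == "") with
  | nil => rw [hys] at h; simp [pvGroups] at h
  | cons s rest =>
    rw [hys] at h
    have hs : s ≠ "" := by
      have := pv_dropWhile_head _ xs s rest hys
      simpa using this
    have h1 := pvGroups_mu_lt s rest hs g h
    have h2 : pvMu (s :: rest) ≤ pvMu xs := by
      rw [← hys]
      exact pvMu_sublist (List.dropWhile_sublist _)
    omega

def pvBuild (xs : List String) : String :=
  let ys := xs.dropWhile (fun s => s == "")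
  let gs := pvGroups ys
  let ptrns := gs.attach.map (fun g => String.ofList [g.1.1] ++ pvBuild g.1.2)
  if ptrns.isEmpty then ""
  else if ys.length < xs.length then "(?:" ++ PySem.Str.join "|" ptrns ++ ")?"
  else if 1 < ptrns.length then "(?:" ++ PySem.Str.join "|" ptrns ++ ")"
  else ptrns.headD ""
termination_by pvMu xs
decreasing_by exact pvB_mu_lt xs g.1 g.2

-- ---- A = pvBuild ∘ sort ----

lemma pvA_snd (m : List String) (d : PySem.Dict Char (List String)) (b : Bool) :
    (m.foldl pvAStep (d, b)).2 = (b || m.any (fun s => s == "")) := by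
  induction m generalizing d b with
  | nil => simp
  | cons s t ih =>
    by_cases h : s == ""
    · simp [pvAStep, h, ih]
    · simp [pvAStep, h, ih]

lemma pv_eq_empty (s : String) (h : s.toList = []) : s = "" := by
  have := congrArg String.ofList h
  rw [String.ofList_toList] at this
  exact this

lemma pv_le_nil (l : List Char) (h : l ≤ []) : l = [] := by
  cases l with
  | nil => rfl
  | cons a t => exact absurd h (not_le_of_gt (List.Lex.nil))

lemma pv_cons_toList (s : String) (h : s ≠ "") :
    s.toList = pvHead s :: (pvTail s).toList := by
  have h1 : s.toList ≠ [] := pv_toList_ne s h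
  cases hl : s.toList with
  | nil => exact absurd hl h1
  | cons a t => simp [pvHead, pvTail, hl]

lemma pvHead_mono (s t : String) (hs : s ≠ "") (ht : t ≠ "") (h : s ≤ t) :
    pvHead s ≤ pvHead t := by
  have h' := String.le_iff_toList_le.1 h
  rw [pv_cons_toList s hs, pv_cons_toList t ht] at h'
  by_contra hab
  have hba : pvHead t < pvHead s := lt_of_not_ge hab
  exact absurd h' (not_le_of_gt (List.Lex.rel hba))

lemma pvTail_mono (s t : String) (hs : s ≠ "") (ht : t ≠ "") (hh : pvHead s = pvHead t)
    (h : s ≤ t) : pvTail s ≤ pvTail t := by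
  have h' := String.le_iff_toList_le.1 h
  rw [pv_cons_toList s hs, pv_cons_toList t ht, hh] at h'
  rw [String.le_iff_toList_le]
  by_contra hlm
  have : (pvTail t).toList < (pvTail s).toList := lt_of_not_ge hlm
  exact absurd h' (not_le_of_gt (List.Lex.cons this))

-- in a sorted list the empty strings are exactly the leading ones
lemma pv_drop_filter (l : List String) (hp : l.Pairwise (· ≤ ·)) :
    l.dropWhile (fun s => s == "") = l.filter (fun s => !(s == "")) := by
  induction l with
  | nil => rfl
  | cons x t ih =>
    rcases List.pairwise_cons.1 hp with ⟨hx, hpt⟩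
    by_cases h : x == ""
    · simp only [List.dropWhile_cons, List.filter_cons, h, Bool.not_true, if_true]
      rw [if_neg (by simp)]
      exact ih hpt
    · have hxne : x ≠ "" := by simpa using h
      have hnot : ∀ y ∈ t, ¬(y == "") := by
        intro y hy hbe
        have hy0 : y = "" := by simpa using hbe
        have hxy := hx y hy
        rw [hy0] at hxy
        have h0 := pv_le_nil x.toList (by
          have := String.le_iff_toList_le.1 hxy
          simpa using this)
        exact hxne (pv_eq_empty x h0)
      simp only [List.dropWhile_cons, List.filter_cons, h, Bool.not_false, Bool.false_eq_true,
        if_false, if_true]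
      rw [List.filter_eq_self.2 (fun y hy => by simpa using hnot y hy)]

lemma pv_discard_of_not_mem (l₂ : List Char) (c : Char) (h2 : c ∉ l₂) :
    (PySem.Set.ofList l₂).discard c = PySem.Set.ofList l₂ := by
  rw [PySem.Set.discard.eq_1]
  refine List.filter_eq_self.2 (fun y hy => ?_)
  have hyl : y ∈ l₂ := (PySem.Set.mem_ofList l₂ y).1 hy
  have : y ≠ c := fun hyc => h2 (hyc ▸ hyl)
  simpa using this

lemma pv_ofList_run (c : Char) (l₁ l₂ : List Char) (h1 : ∀ x ∈ l₁, x = c) (h2 : c ∉ l₂) :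
    PySem.Set.ofList (c :: (l₁ ++ l₂)) = c :: PySem.Set.ofList l₂ := by
  induction l₁ with
  | nil =>
    rw [List.nil_append, PySem.Set.ofList_cons, pv_discard_of_not_mem l₂ c h2]
  | cons x t ih =>
    have hx : x = c := h1 x List.mem_cons_self
    subst hx
    have ih' := ih (fun z hz => h1 z (List.mem_cons_of_mem _ hz))
    rw [PySem.Set.ofList_cons] at ih'
    have htail := (List.cons.inj ih').2
    rw [List.cons_append, PySem.Set.ofList_cons, PySem.Set.ofList_cons, htail]
    have hd : PySem.Set.discard (x :: PySem.Set.ofList l₂) x = PySem.Set.ofList l₂ := by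
      rw [PySem.Set.discard.eq_1, List.filter_cons]
      simp only [beq_self_eq_true, Bool.not_true, Bool.false_eq_true, if_false]
      rw [← PySem.Set.discard.eq_1, pv_discard_of_not_mem l₂ x h2]
    rw [hd]

-- key grouping fact: on a sorted list of nonempty strings, A's bucket items are the runs
lemma pv_items_eq_groups (n : Nat) : ∀ (m : List String), m.length ≤ n →
    m.Pairwise (· ≤ ·) → (∀ s ∈ m, s ≠ "") →
    (PySem.Set.ofList (m.map pvHead)).map
        (fun c => (c, ((pvPairs m).filter (fun p => p.1 == c)).map (fun p => p.2)))
      = pvGroups m := by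
  induction n with
  | zero =>
    intro m hm _ _
    have : m = [] := List.length_eq_zero_iff.1 (Nat.le_zero.1 hm)
    subst this
    simp [pvGroups, pvPairs]
  | succ n ih =>
    intro m hm hp hne
    match m with
    | [] => simp [pvGroups, pvPairs]
    | s :: rest =>
      obtain ⟨hs_all, hprest⟩ := List.pairwise_cons.1 hp
      have hsne : s ≠ "" := hne s List.mem_cons_self
      set c := pvHead s with hc
      set p : String → Bool := fun t => pvHead t == c with hpdef
      set P := rest.takeWhile p with hP
      set R := rest.dropWhile p with hR
      have hPR : P ++ R = rest := List.takeWhile_append_dropWhile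
      have hPc : ∀ t ∈ P, pvHead t = c := by
        intro t ht
        have := List.mem_takeWhile_imp ht
        simpa [hpdef] using this
      have hR_gt : ∀ t ∈ R, c < pvHead t := by
        intro t ht
        cases hR0 : R with
        | nil => rw [hR0] at ht; simp at ht
        | cons t0 R' =>
          have ht0f : p t0 = false := pv_dropWhile_head p rest t0 R' (by rw [← hR, hR0])
          have ht0ne : pvHead t0 ≠ c := by simpa [hpdef] using ht0f
          have ht0R : t0 ∈ R := by rw [hR0]; exact List.mem_cons_self
          have ht0rest : t0 ∈ rest := by
            rw [← hPR]; exact List.mem_append_right P ht0R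
          have ht0ne' : t0 ≠ "" := hne t0 (List.mem_cons_of_mem _ ht0rest)
          have hle0 : c ≤ pvHead t0 := pvHead_mono s t0 hsne ht0ne' (hs_all t0 ht0rest)
          have hlt0 : c < pvHead t0 := lt_of_le_of_ne hle0 (Ne.symm ht0ne)
          rw [hR0] at ht
          rcases List.mem_cons.1 ht with rfl | ht'
          · exact hlt0
          · have hRsub : R.Sublist rest := List.dropWhile_sublist p
            have hpR : R.Pairwise (· ≤ ·) := List.Pairwise.sublist hRsub hprest
            rw [hR0] at hpR
            have h01 : t0 ≤ t := (List.pairwise_cons.1 hpR).1 t ht'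
            have htne : t ≠ "" := hne t (List.mem_cons_of_mem _ (hRsub.subset (hR0 ▸ List.mem_cons_of_mem _ ht')))
            exact lt_of_lt_of_le hlt0 (pvHead_mono t0 t ht0ne' htne h01)
      have hc_not_R : c ∉ R.map pvHead := by
        intro hcm
        obtain ⟨t, ht, hteq⟩ := List.mem_map.1 hcm
        exact absurd hteq (ne_of_gt (hR_gt t ht))
      have hheads : (s :: rest).map pvHead = c :: (P.map pvHead ++ R.map pvHead) := by
        rw [← hPR]; simp; exact hc.symm
      have hofl : PySem.Set.ofList ((s :: rest).map pvHead) = c :: PySem.Set.ofList (R.map pvHead) := by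
        rw [hheads]
        exact pv_ofList_run c (P.map pvHead) (R.map pvHead)
          (fun x hx => by obtain ⟨t, ht, rfl⟩ := List.mem_map.1 hx; exact hPc t ht) hc_not_R
      have hpairs : pvPairs (s :: rest) = (c, pvTail s) :: (pvPairs P ++ pvPairs R) := by
        rw [← hPR]; simp [pvPairs, hc]
      have hfilP : ∀ c' : Char, c' ≠ c → (pvPairs P).filter (fun q => q.1 == c') = [] := by
        intro c' hc'
        refine List.filter_eq_nil_iff.2 (fun q hq => ?_)
        obtain ⟨t, ht, rfl⟩ := List.mem_map.1 hq
        simp [hPc t ht, Ne.symm hc']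
      have hfilPc : (pvPairs P).filter (fun q => q.1 == c) = pvPairs P := by
        refine List.filter_eq_self.2 (fun q hq => ?_)
        obtain ⟨t, ht, rfl⟩ := List.mem_map.1 hq
        simp [hPc t ht]
      have hfilRc : (pvPairs R).filter (fun q => q.1 == c) = [] := by
        refine List.filter_eq_nil_iff.2 (fun q hq => ?_)
        obtain ⟨t, ht, rfl⟩ := List.mem_map.1 hq
        simp [ne_of_gt (hR_gt t ht)]
      rw [hofl, List.map_cons]
      have hrun := pvRun_eq c rest
      rw [pvGroups]
      congr 1
      · rw [hpairs]
        simp only [List.filter_cons, List.filter_append, beq_self_eq_true, if_true, hfilPc, hfilRc,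
          List.append_nil, List.map_cons]
        rw [← hc, hrun]
        congr 1
        simp only [pvPairs, List.map_map]
        rw [hP, hpdef]
        exact congrArg _ (List.map_congr_left (fun t _ => rfl))
      · rw [show (pvRun (pvHead s) rest).2 = R from by rw [← hc, hrun]]
        rw [← ih R (by
            have : R.length ≤ rest.length := (List.dropWhile_sublist p).length_le
            simp only [List.length_cons] at hm
            omega)
          (List.Pairwise.sublist (List.dropWhile_sublist p) hprest)
          (fun t ht => hne t (List.mem_cons_of_mem _ ((List.dropWhile_sublist p).subset ht)))]
        refine List.map_congr_left (fun c' hc' => ?_)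
        have hc'R : c' ∈ R.map pvHead := (PySem.Set.mem_ofList _ _).1 hc'
        obtain ⟨t, ht, rfl⟩ := List.mem_map.1 hc'R
        have hcne : pvHead t ≠ c := ne_of_gt (hR_gt t ht)
        rw [hpairs]
        simp only [List.filter_cons, List.filter_append, hfilP _ hcne, List.nil_append]
        rw [if_neg (by simpa using Ne.symm hcne)]

-- tails of each run are still sorted
lemma pvGroups_pairwise (n : Nat) : ∀ (m : List String), m.length ≤ n →
    m.Pairwise (· ≤ ·) → (∀ s ∈ m, s ≠ "") →
    ∀ g ∈ pvGroups m, g.2.Pairwise (· ≤ ·) := by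
  induction n with
  | zero =>
    intro m hm _ _
    have : m = [] := List.length_eq_zero_iff.1 (Nat.le_zero.1 hm)
    subst this
    simp [pvGroups]
  | succ n ih =>
    intro m hm hp hne g hg
    match m with
    | [] => simp [pvGroups] at hg
    | s :: rest =>
      obtain ⟨hs_all, hprest⟩ := List.pairwise_cons.1 hp
      rw [pvGroups] at hg
      rcases List.mem_cons.1 hg with rfl | hg'
      · rw [pvRun_eq]
        simp only
        rw [show pvTail s :: (rest.takeWhile (fun t => pvHead t == pvHead s)).map pvTail
            = ((s :: rest.takeWhile (fun t => pvHead t == pvHead s)).map pvTail) from rfl]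
        rw [List.pairwise_map]
        have hsub : (s :: rest.takeWhile (fun t => pvHead t == pvHead s)).Sublist (s :: rest) :=
          (List.takeWhile_sublist _).cons₂ s
        have hpair : (s :: rest.takeWhile (fun t => pvHead t == pvHead s)).Pairwise (· ≤ ·) :=
          List.Pairwise.sublist hsub hp
        refine List.Pairwise.imp_of_mem ?_ hpair
        intro a b ha hb hab
        have hmemab : ∀ x ∈ s :: rest.takeWhile (fun t => pvHead t == pvHead s),
            x ≠ "" ∧ pvHead x = pvHead s := by
          intro x hx
          rcases List.mem_cons.1 hx with rfl | hx'
          · exact ⟨hne x List.mem_cons_self, rfl⟩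
          · refine ⟨hne x (List.mem_cons_of_mem _ ((List.takeWhile_sublist _).subset hx')), ?_⟩
            have := List.mem_takeWhile_imp hx'
            simpa using this
        obtain ⟨hane, hah⟩ := hmemab a ha
        obtain ⟨hbne, hbh⟩ := hmemab b hb
        exact pvTail_mono a b hane hbne (hah.trans hbh.symm) hab
      · have hsub : ((pvRun (pvHead s) rest).2).Sublist rest := by
          rw [pvRun_eq]; exact List.dropWhile_sublist _
        refine ih (pvRun (pvHead s) rest).2 ?_ (List.Pairwise.sublist hsub hprest)
          (fun t ht => hne t (List.mem_cons_of_mem _ (hsub.subset ht))) g hg'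
        have := hsub.length_le
        simp only [List.length_cons] at hm
        omega

lemma pv_map_attach_isEmpty {α β : Type} (L : List α) (f : {x // x ∈ L} → β) :
    (L.attach.map f).isEmpty = L.isEmpty := by
  cases L <;> simp

lemma pv_attach_map {α β : Type} (L : List α) (f : α → β) :
    L.attach.map (fun a => f a.1) = L.map f := by
  rw [List.attach_map_val]

lemma pv_attach_map_congr {α β : Type} (L1 L2 : List α) (h : L1 = L2) (f g : α → β)
    (hfg : ∀ x ∈ L2, f x = g x) :
    L1.attach.map (fun a => f a.1) = L2.attach.map (fun a => g a.1) := by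
  subst h
  rw [List.attach_map_val, List.attach_map_val]
  exact List.map_congr_left hfg

lemma pvT (strs : List String) :
    optimize_alternations strs = pvBuild (PySem.List.sorted strs (fun s => s) false) := by
  suffices H : ∀ (n : Nat) (strs : List String), pvMu strs < n →
      optimize_alternations strs = pvBuild (PySem.List.sorted strs (fun s => s) false) by
    exact H (pvMu strs + 1) strs (Nat.lt_succ_self _)
  intro n
  induction n with
  | zero => intro strs h; omega
  | succ n ih =>
    intro strs hlt
    set l := PySem.List.sorted strs (fun s => s) false with hl
    have hp : l.Pairwise (· ≤ ·) := by
      rw [hl]; simpa using PySem.List.sorted_pairwise strs (fun s => s)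
    have hmu : pvMu l = pvMu strs := by
      rw [hl]; exact (List.Perm.map pvW (PySem.List.sorted_perm strs (fun s => s) false)).sum_eq
    set fl := l.filter (fun s => !(s == "")) with hfl
    have hys : l.dropWhile (fun s => s == "") = fl := pv_drop_filter l hp
    have hfl_pair : fl.Pairwise (· ≤ ·) := List.Pairwise.sublist List.filter_sublist hp
    have hfl_ne : ∀ s ∈ fl, s ≠ "" := fun s hs => by
      have := List.of_mem_filter hs; simpa using this
    have hitems : (l.foldl pvAStep (PySem.Dict.empty, false)).1.items = pvGroups fl := by
      rw [pvA_fst, ← hfl, pvDict_items]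
      exact pv_items_eq_groups fl.length fl le_rfl hfl_pair hfl_ne
    have hsnd : (l.foldl pvAStep (PySem.Dict.empty, false)).2 = l.any (fun s => s == "") := by
      simpa using pvA_snd l PySem.Dict.empty false
    have hopt : (l.any (fun s => s == "")) = decide (fl.length < l.length) := by
      have hiff : fl.length < l.length ↔ l.any (fun s => s == "") = true := by
        rw [hfl, List.length_filter_lt_length_iff_exists, List.any_eq_true]
        constructor
        · rintro ⟨x, hx, hpx⟩; exact ⟨x, hx, by simpa using hpx⟩
        · rintro ⟨x, hx, hpx⟩; exact ⟨x, hx, by simpa using hpx⟩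
      by_cases hP : fl.length < l.length
      · rw [hiff.1 hP, decide_eq_true hP]
      · have hA : l.any (fun s => s == "") ≠ true := fun hA => hP (hiff.2 hA)
        rw [Bool.eq_false_iff.2 hA, decide_eq_false hP]
    have hptrn : ∀ g ∈ pvGroups fl, optimize_alternations g.2 = pvBuild g.2 := by
      intro g hg
      have hmem : g ∈ (l.foldl pvAStep (PySem.Dict.empty, false)).1.items := by
        rw [hitems]; exact hg
      have hlt2 : pvMu g.2 < n := by
        have h1 := pvA_mu_lt strs g (by rw [← hl]; exact hmem)
        omega
      have hpair : g.2.Pairwise (· ≤ ·) :=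
        pvGroups_pairwise fl.length fl le_rfl hfl_pair hfl_ne g hg
      have hsor : PySem.List.sorted g.2 (fun s => s) false = g.2 :=
        PySem.List.sorted_eq_self_of_pairwise g.2 (fun s => s) (by simpa using hpair)
      rw [ih g.2 hlt2, hsor]
    rw [optimize_alternations, pvBuild]
    simp only [← hl, hys, hitems, hsnd, hopt]
    have hGg : pvGroups (l.dropWhile (fun s => s == "")) = pvGroups fl := by rw [hys]
    have hmap : ((List.foldl pvAStep (PySem.Dict.empty, false)
            (PySem.List.sorted strs (fun s => s) false)).1.items.attach.map
          (fun kv => String.ofList [kv.1.1] ++ optimize_alternations kv.1.2))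
        = ((pvGroups (l.dropWhile (fun s => s == ""))).attach.map
          (fun g => String.ofList [g.1.1] ++ pvBuild g.1.2)) := by
      refine pv_attach_map_congr _ _ ?_
        (fun x : Char × List String => String.ofList [x.1] ++ optimize_alternations x.2)
        (fun x : Char × List String => String.ofList [x.1] ++ pvBuild x.2) ?_
      · rw [hGg]; exact hitems
      · intro x hx
        rw [hGg] at hx
        simp only []
        rw [hptrn x hx]
    rw [hmap]
    simp only [pv_map_attach_isEmpty, hGg, decide_eq_true_eq]

-- ---- B (stack machine) = pvBuild ∘ sort ----

lemma pvLcp_nil (l : List Char) : pvLcp [] l = 0 := by cases l <;> rfl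

lemma pvLcp_cons_eq (c : Char) (p t : List Char) : pvLcp (c :: p) (c :: t) = pvLcp p t + 1 := by
  simp [pvLcp]

lemma pvLcp_cons_ne (c c' : Char) (p t : List Char) (h : c' ≠ c) :
    pvLcp (c :: p) (c' :: t) = 0 := by
  simp [pvLcp, (Ne.symm h)]

lemma pvPushN_eq (n : Nat) (st : List (Bool × List String)) :
    pvPushN n st = List.replicate n (false, []) ++ st := by
  induction n generalizing st with
  | zero => rfl
  | succ n ih =>
    rw [pvPushN, ih,
      show ((false, []) :: st : List (Bool × List String)) = [(false, ([] : List String))] ++ st from rfl,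
      ← List.append_assoc, ← List.replicate_succ']

lemma pvPopTo_ne (k : Nat) : ∀ (n : Nat) (st : List (Bool × List String)) (p : List Char),
    st.length ≤ n → st ≠ [] → pvPopTo k st p ≠ [] := by
  intro n
  induction n with
  | zero => intro st p h hne; exact absurd (List.length_eq_zero_iff.1 (Nat.le_zero.1 h)) hne
  | succ n ih =>
    intro st p hlen hne
    match st with
    | [] => exact absurd rfl hne
    | [f] => simp [pvPopTo]
    | (opt, ptrns) :: f2 :: rest =>
      rw [pvPopTo]
      by_cases hk : rest.length + 1 > k
      · rw [if_pos hk]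
        refine ih _ p ?_ (by simp)
        simp only [List.length_cons] at hlen ⊢
        omega
      · rw [if_neg hk]; simp

lemma pvPopTo_shift (k : Nat) : ∀ (n : Nat) (S : List (Bool × List String))
    (f : Bool × List String) (c : Char) (p : List Char), S.length ≤ n → S ≠ [] →
    pvPopTo (k + 1) (S ++ [f]) (c :: p) = pvPopTo k S p ++ [f] := by
  intro n
  induction n with
  | zero => intro S f c p h hne; exact absurd (List.length_eq_zero_iff.1 (Nat.le_zero.1 h)) hne
  | succ n ih =>
    intro S f c p hlen hne
    match S with
    | [] => exact absurd rfl hne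
    | [g] =>
      obtain ⟨go, gp⟩ := g
      rw [show ([(go, gp)] ++ [f] : List (Bool × List String)) = (go, gp) :: f :: [] from rfl,
        pvPopTo]
      rw [if_neg (by simp)]
      simp [pvPopTo]
    | (opt, ptrns) :: f2 :: rest =>
      rw [show ((opt, ptrns) :: f2 :: rest ++ [f] : List (Bool × List String))
          = (opt, ptrns) :: f2 :: (rest ++ [f]) from by simp, pvPopTo, pvPopTo]
      by_cases hk : rest.length + 1 > k
      · rw [if_pos (by simp; omega), if_pos hk]
        rw [List.length_append, List.length_cons, List.length_nil,
          List.getD_cons_succ]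
        rw [show ((f2.1, f2.2 ++ [String.ofList [p.getD rest.length ' '] ++ pvRender opt ptrns])
            :: (rest ++ [f]) : List (Bool × List String))
          = ((f2.1, f2.2 ++ [String.ofList [p.getD rest.length ' '] ++ pvRender opt ptrns])
            :: rest) ++ [f] from by simp]
        refine ih _ f c p ?_ (by simp)
        simp only [List.length_cons] at hlen ⊢
        omega
      · rw [if_neg (by simp; omega), if_neg hk]
        simp

lemma pvMarkTop_append (X Y : List (Bool × List String)) (h : X ≠ []) :
    pvMarkTop (X ++ Y) = pvMarkTop X ++ Y := by
  match X with
  | [] => exact absurd rfl h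
  | (a, b) :: t => simp [pvMarkTop]

lemma pvMarkTop_ne (X : List (Bool × List String)) (h : X ≠ []) : pvMarkTop X ≠ [] := by
  match X with
  | [] => exact absurd rfl h
  | (a, b) :: t => simp [pvMarkTop]

lemma pvStep_ne (st : List (Bool × List String) × List Char) (s : String) (h : st.1 ≠ []) :
    (pvStep st s).1 ≠ [] := by
  unfold pvStep
  refine pvMarkTop_ne _ ?_
  rw [pvPushN_eq]
  simp only [ne_eq, List.append_eq_nil_iff, not_and]
  intro _
  exact pvPopTo_ne _ st.1.length st.1 st.2 le_rfl h

lemma pvStep_single (b : Bool) (p0 : List String) (q : List Char) (s : String)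
    (hk : pvLcp q s.toList = 0) :
    pvStep ([(b, p0)], q) s = (pvMarkTop (pvPushN s.toList.length [(b, p0)]), s.toList) := by
  unfold pvStep
  simp only [hk, Nat.sub_zero]
  rw [show pvPopTo 0 [(b, p0)] q = [(b, p0)] from by simp [pvPopTo]]

lemma pvStep_shift (S : List (Bool × List String)) (f : Bool × List String) (c : Char)
    (p : List Char) (s : String) (hS : S ≠ []) (hs : s.toList = c :: (pvTail s).toList) :
    pvStep (S ++ [f], c :: p) s =
      ((pvStep (S, p) (pvTail s)).1 ++ [f], c :: (pvStep (S, p) (pvTail s)).2) := by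
  unfold pvStep
  simp only [hs, pvLcp_cons_eq, List.length_cons, Nat.succ_sub_succ]
  rw [pvPopTo_shift _ S.length S f c p le_rfl hS]
  have hX : pvPopTo (pvLcp p (pvTail s).toList) S p ≠ [] :=
    pvPopTo_ne _ S.length S p le_rfl hS
  rw [pvPushN_eq, pvPushN_eq, ← List.append_assoc,
    pvMarkTop_append _ [f] (by simp only [ne_eq, List.append_eq_nil_iff, not_and]; intro _; exact hX)]

lemma pvFold_shift (c : Char) (f : Bool × List String) :
    ∀ (L : List String) (S : List (Bool × List String)) (p : List Char), S ≠ [] →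
    (∀ s' ∈ L, s'.toList = c :: (pvTail s').toList) →
    List.foldl pvStep (S ++ [f], c :: p) L
      = ((List.foldl (fun st s' => pvStep st (pvTail s')) (S, p) L).1 ++ [f],
         c :: (List.foldl (fun st s' => pvStep st (pvTail s')) (S, p) L).2) := by
  intro L
  induction L with
  | nil => intro S p hS _; simp
  | cons s' L ih =>
    intro S p hS hall
    rw [List.foldl_cons, List.foldl_cons,
      pvStep_shift S f c p s' hS (hall s' List.mem_cons_self)]
    have h1 : (pvStep (S, p) (pvTail s')).1 ≠ [] := pvStep_ne (S, p) (pvTail s') hS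
    have := ih (pvStep (S, p) (pvTail s')).1 (pvStep (S, p) (pvTail s')).2 h1
      (fun t ht => hall t (List.mem_cons_of_mem _ ht))
    simpa using this

lemma pvFoldStep_ne (L : List String) :
    ∀ (st : List (Bool × List String) × List Char), st.1 ≠ [] →
    (List.foldl pvStep st L).1 ≠ [] := by
  induction L with
  | nil => intro st h; exact h
  | cons s L ih => intro st h; exact ih _ (pvStep_ne st s h)

lemma pvFlush_shift : ∀ (n : Nat) (S : List (Bool × List String)), S.length ≤ n → S ≠ [] →
    ∀ (f : Bool × List String) (c : Char) (p : List Char),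
    pvFlush (S ++ [f]) (c :: p) = pvRender f.1 (f.2 ++ [String.ofList [c] ++ pvFlush S p]) := by
  intro n
  induction n with
  | zero => intro S h hne; exact absurd (List.length_eq_zero_iff.1 (Nat.le_zero.1 h)) hne
  | succ n ih =>
    intro S hlen hne f c p
    match S with
    | [] => exact absurd rfl hne
    | [g] =>
      obtain ⟨go, gp⟩ := g
      rw [show ([(go, gp)] ++ [f] : List (Bool × List String)) = (go, gp) :: f :: [] from rfl,
        pvFlush]
      simp [pvFlush]
    | (opt, ptrns) :: f2 :: rest =>
      rw [show ((opt, ptrns) :: f2 :: rest ++ [f] : List (Bool × List String))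
          = (opt, ptrns) :: f2 :: (rest ++ [f]) from by simp, pvFlush, pvFlush]
      rw [List.length_append, List.length_cons, List.length_nil, List.getD_cons_succ]
      rw [show ((f2.1, f2.2 ++ [String.ofList [p.getD rest.length ' '] ++ pvRender opt ptrns])
          :: (rest ++ [f]) : List (Bool × List String))
        = ((f2.1, f2.2 ++ [String.ofList [p.getD rest.length ' '] ++ pvRender opt ptrns])
          :: rest) ++ [f] from by simp]
      refine ih _ ?_ (by simp) f c p
      simp only [List.length_cons] at hlen ⊢
      omega

lemma pvPopTo0_shift : ∀ (n : Nat) (S : List (Bool × List String)), S.length ≤ n → S ≠ [] →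
    ∀ (f : Bool × List String) (c : Char) (p : List Char),
    pvPopTo 0 (S ++ [f]) (c :: p) = [(f.1, f.2 ++ [String.ofList [c] ++ pvFlush S p])] := by
  intro n
  induction n with
  | zero => intro S h hne; exact absurd (List.length_eq_zero_iff.1 (Nat.le_zero.1 h)) hne
  | succ n ih =>
    intro S hlen hne f c p
    match S with
    | [] => exact absurd rfl hne
    | [g] =>
      obtain ⟨go, gp⟩ := g
      rw [show ([(go, gp)] ++ [f] : List (Bool × List String)) = (go, gp) :: f :: [] from rfl,
        pvPopTo]
      rw [if_pos (by simp)]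
      simp [pvPopTo, pvFlush]
    | (opt, ptrns) :: f2 :: rest =>
      rw [show ((opt, ptrns) :: f2 :: rest ++ [f] : List (Bool × List String))
          = (opt, ptrns) :: f2 :: (rest ++ [f]) from by simp, pvPopTo]
      rw [if_pos (by simp)]
      rw [List.length_append, List.length_cons, List.length_nil, List.getD_cons_succ]
      rw [show ((f2.1, f2.2 ++ [String.ofList [p.getD rest.length ' '] ++ pvRender opt ptrns])
          :: (rest ++ [f]) : List (Bool × List String))
        = ((f2.1, f2.2 ++ [String.ofList [p.getD rest.length ' '] ++ pvRender opt ptrns])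
          :: rest) ++ [f] from by simp]
      rw [ih _ (by simp only [List.length_cons] at hlen ⊢; omega) (by simp) f c p]
      rw [pvFlush]

-- leading empty strings only set the root's optional flag
lemma pvE : ∀ (T : List String) (b : Bool) (p0 m' : List String), (∀ s ∈ T, s = "") →
    List.foldl pvStep ([(b, p0)], []) (T ++ m')
      = List.foldl pvStep ([((b || !T.isEmpty), p0)], []) m' := by
  intro T
  induction T with
  | nil => intro b p0 m' _; simp
  | cons t T ih =>
    intro b p0 m' hall
    have ht : t = "" := hall t List.mem_cons_self
    subst ht
    rw [List.cons_append, List.foldl_cons]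
    have hstep : pvStep ([(b, p0)], []) "" = ([(true, p0)], []) := by
      rw [pvStep_single b p0 [] "" (pvLcp_nil _)]
      simp [pvPushN, pvMarkTop]
    rw [hstep, ih true p0 m' (fun s hs => hall s (List.mem_cons_of_mem _ hs))]
    simp

-- the stack scan over a sorted list of nonempty strings produces the groups' patterns
lemma pvG : ∀ (n : Nat) (m : List String), m.length ≤ n →
    m.Pairwise (· ≤ ·) → (∀ s ∈ m, s ≠ "") →
    (∀ ts, pvMu ts < pvMu m → ts.Pairwise (· ≤ ·) →
        pvFlush (List.foldl pvStep ([(false, [])], []) ts).1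
            (List.foldl pvStep ([(false, [])], []) ts).2 = pvBuild ts) →
    ∀ (b : Bool) (p0 : List String) (q : List Char),
      (m ≠ [] → pvLcp q (m.headD "").toList = 0) →
      pvFlush (List.foldl pvStep ([(b, p0)], q) m).1 (List.foldl pvStep ([(b, p0)], q) m).2
        = pvRender b (p0 ++ (pvGroups m).map (fun g => String.ofList [g.1] ++ pvBuild g.2)) := by
  intro n
  induction n with
  | zero =>
    intro m hm _ _ _ b p0 q _
    have : m = [] := List.length_eq_zero_iff.1 (Nat.le_zero.1 hm)
    subst this
    simp [pvGroups, pvFlush]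
  | succ n ih =>
    intro m hm hp hne HI b p0 q hq
    match m with
    | [] => simp [pvGroups, pvFlush]
    | s :: rest =>
      obtain ⟨hs_all, hprest⟩ := List.pairwise_cons.1 hp
      have hsne : s ≠ "" := hne s List.mem_cons_self
      set c := pvHead s with hc
      set run := rest.takeWhile (fun t => pvHead t == c) with hrun
      set rest' := rest.dropWhile (fun t => pvHead t == c) with hrest'
      have hrr : run ++ rest' = rest := List.takeWhile_append_dropWhile
      have hrun_prop : ∀ s' ∈ run, s' ≠ "" ∧ s'.toList = c :: (pvTail s').toList := by
        intro s' hs'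
        have hmem : s' ∈ rest := by rw [← hrr]; exact List.mem_append_left _ hs'
        have hne' : s' ≠ "" := hne s' (List.mem_cons_of_mem _ hmem)
        have hh : pvHead s' = c := by
          have := List.mem_takeWhile_imp hs'
          simpa using this
        exact ⟨hne', by rw [pv_cons_toList s' hne', hh]⟩
      -- tails of the leading run
      set ts := pvTail s :: (pvRun c rest).1 with hts
      have hts_eq : ts = (s :: run).map pvTail := by
        rw [hts, pvRun_eq, hrun]
        simp
      -- first step
      have hstep1 : pvStep ([(b, p0)], q) s
          = ((pvStep ([(false, [])], ([] : List Char)) (pvTail s)).1 ++ [((b : Bool), p0)],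
             c :: (pvStep ([(false, [])], ([] : List Char)) (pvTail s)).2) := by
        rw [pvStep_single b p0 q s (hq (by simp) ), pvStep_single false [] [] (pvTail s) (pvLcp_nil _)]
        have hlen : s.toList.length = (pvTail s).toList.length + 1 := by
          rw [pv_cons_toList s hsne]; rfl
        rw [hlen, pvPushN_eq, pvPushN_eq, Prod.mk.injEq]
        refine ⟨?_, ?_⟩
        · rw [show (List.replicate ((pvTail s).toList.length) ((false : Bool), ([] : List String))
                ++ [((false : Bool), ([] : List String))])
              = List.replicate ((pvTail s).toList.length + 1) ((false : Bool), ([] : List String))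
            from List.replicate_succ'.symm]
          rw [pvMarkTop_append _ [(b, p0)] (by simp)]
        · exact pv_cons_toList s hsne
      set W := pvStep ([((false : Bool), ([] : List String))], ([] : List Char)) (pvTail s) with hW
      have hWne : W.1 ≠ [] := pvStep_ne _ _ (by simp)
      -- fold over the run, shifted
      set V := List.foldl (fun st s' => pvStep st (pvTail s')) W run with hV
      have hfoldrun : List.foldl pvStep (W.1 ++ [(b, p0)], c :: W.2) run
          = (V.1 ++ [(b, p0)], c :: V.2) := by
        rw [pvFold_shift c (b, p0) run W.1 W.2 hWne (fun s' hs' => (hrun_prop s' hs').2)]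
      have hVts : V = List.foldl pvStep ([((false : Bool), ([] : List String))], ([] : List Char)) ts := by
        rw [hV, hW, hts_eq, List.map_cons, List.foldl_cons, List.foldl_map]
      have hVne : V.1 ≠ [] := by
        rw [hVts]
        exact pvFoldStep_ne ts _ (by simp)
      -- the whole fold up to rest'
      have hfold : List.foldl pvStep ([(b, p0)], q) (s :: rest)
          = List.foldl pvStep (V.1 ++ [(b, p0)], c :: V.2) rest' := by
        rw [List.foldl_cons, hstep1, ← hrr, List.foldl_append, hfoldrun]
      -- flush of the run's sub-stack equals pvBuild of the tails
      have hgmem : (c, ts) ∈ pvGroups (s :: rest) := by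
        rw [pvGroups, ← hc, ← hts]
        exact List.mem_cons_self
      have hVB : pvFlush V.1 V.2 = pvBuild ts := by
        rw [hVts]
        refine HI ts ?_ ?_
        · exact pvGroups_mu_lt s rest hsne (c, ts) hgmem
        · exact pvGroups_pairwise (s :: rest).length (s :: rest) le_rfl hp hne (c, ts) hgmem
      have hgroups : pvGroups (s :: rest) = (c, ts) :: pvGroups rest' := by
        rw [pvGroups, ← hc, ← hts, pvRun_eq, ← hrest']
      -- case on rest'
      by_cases hre : rest' = []
      · rw [hfold, hre, List.foldl_nil]
        rw [pvFlush_shift V.1.length V.1 le_rfl hVne (b, p0) c V.2]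
        rw [hVB, hgroups, hre]
        simp [pvGroups]
      · obtain ⟨s₂, more, hre2⟩ := List.exists_cons_of_ne_nil hre
        have hs₂rest : s₂ ∈ rest := by
          rw [← hrr]
          exact List.mem_append_right _ (hre2 ▸ List.mem_cons_self)
        have hs₂ne : s₂ ≠ "" := hne s₂ (List.mem_cons_of_mem _ hs₂rest)
        have hs₂h : pvHead s₂ ≠ c := by
          have := pv_dropWhile_head _ rest s₂ more (by rw [← hrest', hre2])
          simpa using this
        have hlcp : pvLcp (c :: V.2) s₂.toList = 0 := by
          rw [pv_cons_toList s₂ hs₂ne]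
          exact pvLcp_cons_ne c (pvHead s₂) V.2 (pvTail s₂).toList hs₂h
        set p0' := p0 ++ [String.ofList [c] ++ pvFlush V.1 V.2] with hp0'
        have hstep2 : pvStep (V.1 ++ [(b, p0)], c :: V.2) s₂
            = pvStep ([((b : Bool), p0')], c :: V.2) s₂ := by
          rw [pvStep_single b p0' (c :: V.2) s₂ hlcp]
          unfold pvStep
          simp only [hlcp, Nat.sub_zero]
          rw [pvPopTo0_shift V.1.length V.1 le_rfl hVne (b, p0) c V.2]
        have hfold2 : List.foldl pvStep ([(b, p0)], q) (s :: rest)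
            = List.foldl pvStep ([((b : Bool), p0')], c :: V.2) rest' := by
          rw [hfold, hre2, List.foldl_cons, hstep2, ← List.foldl_cons, ← hre2]
        have hsub' : rest'.Sublist rest := by
          rw [hrest']; exact List.dropWhile_sublist _
        have hlen' : rest'.length ≤ n := by
          have := hsub'.length_le
          simp only [List.length_cons] at hm
          omega
        have hIH := ih rest' hlen'
          (List.Pairwise.sublist hsub' hprest)
          (fun t ht => hne t (List.mem_cons_of_mem _ (hsub'.subset ht)))
          (fun ts' hmu hpw => HI ts' (by
            have : pvMu rest' ≤ pvMu (s :: rest) :=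
              pvMu_sublist (hsub'.trans (List.sublist_cons_self _ _))
            omega) hpw)
          b p0' (c :: V.2)
          (fun _ => by rw [hre2]; simpa using hlcp)
        rw [hfold2, hIH, hgroups]
        rw [hp0', hVB]
        simp

-- B's scan equals pvBuild on the sorted list
lemma pvMain : ∀ (N : Nat) (m : List String), pvMu m < N → m.Pairwise (· ≤ ·) →
    pvFlush (List.foldl pvStep ([(false, [])], []) m).1
        (List.foldl pvStep ([(false, [])], []) m).2 = pvBuild m := by
  intro N
  induction N with
  | zero => intro m h; omega
  | succ N ih =>
    intro m hlt hp
    set T := m.takeWhile (fun s => s == "") with hT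
    set m' := m.dropWhile (fun s => s == "") with hm'
    have h0 : T ++ m' = m := List.takeWhile_append_dropWhile
    have hTall : ∀ s ∈ T, s = "" := by
      intro s hs
      have := List.mem_takeWhile_imp hs
      simpa using this
    have hsub : m'.Sublist m := by rw [hm']; exact List.dropWhile_sublist _
    have hm'pair : m'.Pairwise (· ≤ ·) := List.Pairwise.sublist hsub hp
    have hm'ne : ∀ s ∈ m', s ≠ "" := by
      intro s hs
      rw [hm', pv_drop_filter m hp] at hs
      have := List.of_mem_filter hs
      simpa using this
    have hfold : List.foldl pvStep ([((false : Bool), ([] : List String))], ([] : List Char)) m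
        = List.foldl pvStep ([((false || !T.isEmpty : Bool), ([] : List String))], ([] : List Char)) m' := by
      rw [← h0, pvE T false [] m' hTall]
    have HI : ∀ ts, pvMu ts < pvMu m' → ts.Pairwise (· ≤ ·) →
        pvFlush (List.foldl pvStep ([(false, [])], []) ts).1
            (List.foldl pvStep ([(false, [])], []) ts).2 = pvBuild ts := by
      intro ts hmu hpw
      refine ih ts ?_ hpw
      have : pvMu m' ≤ pvMu m := pvMu_sublist hsub
      omega
    have hG := pvG m'.length m' le_rfl hm'pair hm'ne HI (false || !T.isEmpty) [] []
      (fun _ => pvLcp_nil _)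
    rw [hfold, hG]
    -- equate with pvBuild m
    rw [pvBuild]
    simp only [← hm']
    have hmap := pv_attach_map (pvGroups m') (fun g => String.ofList [g.1] ++ pvBuild g.2)
    have hopt : (false || !T.isEmpty) = decide (m'.length < m.length) := by
      have hlen : T.length + m'.length = m.length := by
        rw [← h0, List.length_append]
      by_cases hE : T.isEmpty
      · have : T.length = 0 := by simpa [List.isEmpty_iff_length_eq_zero] using hE
        simp [hE]
        omega
      · have : T.length ≠ 0 := by
          simpa [List.isEmpty_iff_length_eq_zero] using hE
        simp [hE]
        omega
    rw [hmap, hopt, pvRender]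
    simp only [List.nil_append]
    by_cases h1 : ((pvGroups m').map (fun g => String.ofList [g.1] ++ pvBuild g.2)).isEmpty
    · rw [if_pos h1, if_pos h1]
    · rw [if_neg h1, if_neg h1]
      by_cases h2 : m'.length < m.length
      · rw [if_pos (by simpa using h2), if_pos h2]
      · rw [if_neg (by simpa using h2), if_neg h2]

lemma pvAlt (strs : List String) :
    optimize_alternations_alt strs = pvBuild (PySem.List.sorted strs (fun s => s) false) := by
  unfold optimize_alternations_alt
  have hp : (PySem.List.sorted strs (fun s => s) false).Pairwise (· ≤ ·) := by
    simpa using PySem.List.sorted_pairwise strs (fun s => s)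
  exact pvMain (pvMu (PySem.List.sorted strs (fun s => s) false) + 1) _ (Nat.lt_succ_self _) hp

-- ===== VERDICT (by name: the statement is the Claim_ definition above) =====
theorem optimize_alternations_spec : Claim_equal_optimize_alternations := by
  intro strs _
  unfold Spec_optimize_alternations
  rw [pvT strs, pvAlt strs]
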